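-- pv_equiv track=rewrite | github.com/tldjfj123/BaekJoon | 2164.py | card
-- ===== SOURCE A (Python) =====
-- from collections import deque
--
-- def card(n) :
--     d = deque([i for i in range(1, n + 1)])
--     while 1 :
--         if len(d) > 1 :
--             d.popleft()
--             d.append(d.popleft())
--         else :
--             break
--     return sum(d)
-- ===== SOURCE B (Python) =====
-- def card(n):
--     if n < 1:
--         return 0
--     L = 1
--     while L * 2 <= n:
--         L *= 2
--     return n if n == L else 2 * (n - L)
-- ===== Notes on version B (the rewrite author's own statement) =====
-- stated objective: faster
-- what changed: Replaces the O(n) deque simulation of the discard/move card game with the Josephus closed form: L = largest power of two <= n, answer n if n == L else 2*(n-L).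
import Mathlib
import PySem

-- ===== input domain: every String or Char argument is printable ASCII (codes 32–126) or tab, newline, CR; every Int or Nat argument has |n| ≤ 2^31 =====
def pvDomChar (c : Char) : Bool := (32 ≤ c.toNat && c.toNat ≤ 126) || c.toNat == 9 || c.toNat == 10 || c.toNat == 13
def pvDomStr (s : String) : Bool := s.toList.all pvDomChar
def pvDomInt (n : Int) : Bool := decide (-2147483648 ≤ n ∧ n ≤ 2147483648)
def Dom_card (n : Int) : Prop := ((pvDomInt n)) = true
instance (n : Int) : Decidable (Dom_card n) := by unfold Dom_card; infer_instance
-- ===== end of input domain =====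

-- B replaces the O(n) deque simulation with the closed form (L = largest power of 2 ≤ n).

-- ===== PORT A =====
-- the while-loop on the deque: if len > 1, popleft the front card and move the next one to the back
def cardLoop : List Int → List Int
  | [] => []
  | [x] => [x]
  | _ :: b :: rest => cardLoop (rest ++ [b])
termination_by l => l.length
decreasing_by simp

def card (n : Int) : Int := (cardLoop (PySem.List.pyRange 1 (n + 1) 1)).sum

-- ===== PORT B =====
-- the while-loop 'while L * 2 <= n: L *= 2' (positivity of L threaded only for termination)
def altPow (n L : Int) (hL : 0 < L) : Int :=
  if _h : L * 2 ≤ n then altPow n (L * 2) (by omega) else L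
termination_by (n - L).toNat
decreasing_by omega

def card_alt (n : Int) : Int :=
  if n < 1 then 0
  else
    let L := altPow n 1 (by omega)
    if n = L then n else 2 * (n - L)

-- ===== PRECONDITION & SPEC =====
def Spec_card (n : Int) (out : Int) : Prop := out = card_alt n
instance (n : Int) (out : Int) : Decidable (Spec_card n out) := by unfold Spec_card; infer_instance

-- ===== CLAIM (what is proved, stated in full; the proofs are below) =====
def Claim_equal_card : Prop := ∀ (n : Int), Dom_card n → Spec_card n (card n)

-- ===== LEMMAS AND PROOFS =====

-- elements at odd indices 1,3,5,… (the cards moved to the back during one round)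
def odds : List Int → List Int
  | _ :: b :: rest => b :: odds rest
  | _ => []

-- [s, s+d, s+2d, …] with k elements
def stepRange (s d : Int) : Nat → List Int
  | 0 => []
  | k + 1 => s :: stepRange (s + d) d k

theorem odds_nil : odds [] = [] := rfl
theorem cardLoop_nil : cardLoop [] = [] := by rw [cardLoop]
theorem cardLoop_single (x : Int) : cardLoop [x] = [x] := by rw [cardLoop]

theorem cardLoop_step (a b : Int) (rest : List Int) :
    cardLoop (a :: b :: rest) = cardLoop (rest ++ [b]) := by
  rw [cardLoop]

theorem cardLoop_round (k : Nat) : ∀ (l acc : List Int), l.length = 2 * k →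
    cardLoop (l ++ acc) = cardLoop (acc ++ odds l) := by
  induction k with
  | zero =>
    intro l acc h
    rw [List.length_eq_zero_iff.mp h]
    simp [odds_nil]
  | succ k ih =>
    intro l acc h
    match l with
    | [] => simp at h
    | [x] => simp at h; omega
    | a :: b :: rest =>
      have hrest : rest.length = 2 * k := by simp at h; omega
      calc cardLoop ((a :: b :: rest) ++ acc)
          = cardLoop ((rest ++ acc) ++ [b]) := by
            simpa using cardLoop_step a b (rest ++ acc)
        _ = cardLoop (rest ++ (acc ++ [b])) := by rw [List.append_assoc]
        _ = cardLoop ((acc ++ [b]) ++ odds rest) := ih rest (acc ++ [b]) hrest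
        _ = cardLoop (acc ++ odds (a :: b :: rest)) := by
            rw [List.append_assoc]; rfl

theorem odds_append_odd (j : Nat) : ∀ (l : List Int) (x : Int), l.length = 2 * j + 1 →
    odds (l ++ [x]) = odds l ++ [x] := by
  induction j with
  | zero =>
    intro l x h
    match l with
    | [a] => simp [odds]
    | [] => simp at h
    | a :: b :: rest => simp at h
  | succ j ih =>
    intro l x h
    match l with
    | [] => simp at h
    | [a] => simp at h
    | a :: b :: rest =>
      have : rest.length = 2 * j + 1 := by simp at h; omega
      simp only [List.cons_append, odds, ih rest x this]

theorem length_odds_odd (j : Nat) : ∀ (l : List Int), l.length = 2 * j + 1 →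
    (odds l).length = j := by
  induction j with
  | zero =>
    intro l h
    match l with
    | [a] => simp [odds]
    | [] => simp at h
    | a :: b :: rest => simp at h
  | succ j ih =>
    intro l h
    match l with
    | [] => simp at h
    | [a] => simp at h
    | a :: b :: rest =>
      have : rest.length = 2 * j + 1 := by simp at h; omega
      simp [odds, ih rest this]

-- on a deque whose length is a power of two, the survivor is the last card
theorem cardLoop_pow (m : Nat) : ∀ (l : List Int) (x : Int), l.length + 1 = 2 ^ m →
    cardLoop (l ++ [x]) = [x] := by
  induction m with
  | zero =>
    intro l x h
    have : l = [] := List.length_eq_zero_iff.mp (by omega)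
    subst this
    simpa using cardLoop_single x
  | succ m ih =>
    intro l x h
    have hm : 1 ≤ 2 ^ m := Nat.one_le_two_pow
    have hodd : l.length = 2 * (2 ^ m - 1) + 1 := by
      rw [pow_succ] at h; omega
    have heven : (l ++ [x]).length = 2 * 2 ^ m := by
      rw [pow_succ] at h; simp; omega
    have h1 : cardLoop ((l ++ [x]) ++ []) = cardLoop ([] ++ odds (l ++ [x])) :=
      cardLoop_round (2 ^ m) (l ++ [x]) [] heven
    simp only [List.append_nil, List.nil_append] at h1
    rw [h1, odds_append_odd (2 ^ m - 1) l x hodd]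
    exact ih (odds l) x (by rw [length_odds_odd (2 ^ m - 1) l hodd]; omega)

theorem stepRange_succ_right (s d : Int) (k : Nat) :
    stepRange s d (k + 1) = stepRange s d k ++ [s + d * k] := by
  induction k generalizing s with
  | zero => simp [stepRange]
  | succ k ih =>
    rw [stepRange, ih (s + d)]
    rw [stepRange]
    have : s + d + d * k = s + d * (k + 1) := by ring
    rw [this]
    rfl

theorem length_stepRange (s d : Int) (k : Nat) : (stepRange s d k).length = k := by
  induction k generalizing s with
  | zero => rfl
  | succ k ih => simp [stepRange, ih]

-- odds of a unit-step range of even length is the step-2 range of the moved cards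
theorem odds_stepRange_one (k : Nat) : ∀ (s : Int),
    odds (stepRange s 1 (2 * k)) = stepRange (s + 1) 2 k := by
  induction k with
  | zero => intro s; rfl
  | succ k ih =>
    intro s
    have h2 : 2 * (k + 1) = 2 * k + 1 + 1 := by ring
    rw [h2]
    simp only [stepRange, odds, ih (s + 1 + 1)]
    have : s + 1 + 1 + 1 = s + 1 + 2 := by ring
    rw [this]

theorem stepRange_append (s d : Int) (a b : Nat) :
    stepRange s d (a + b) = stepRange s d a ++ stepRange (s + d * a) d b := by
  induction a generalizing s with
  | zero => simp [stepRange]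
  | succ a ih =>
    have h : a + 1 + b = (a + b) + 1 := by omega
    simp only [stepRange, h]
    rw [ih (s + d)]
    have : s + d + d * a = s + d * (a + 1 : Nat) := by push_cast; ring
    rw [this]
    simp

theorem pyRange_eq_stepRange (n : Nat) : ∀ (a : Int),
    PySem.List.pyRange a (a + n) 1 = stepRange a 1 n := by
  induction n with
  | zero =>
    intro a
    simp only [Nat.cast_zero, add_zero, stepRange]
    exact PySem.List.pyRange_one_eq_nil le_rfl
  | succ n ih =>
    intro a
    rw [PySem.List.pyRange_one_cons (by push_cast; omega)]
    have : a + ((n : Nat) + 1 : Nat) = (a + 1) + (n : Nat) := by push_cast; ring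
    rw [this, ih (a + 1)]
    rfl

-- the main simulation result: for 2^m ≤ n < 2^(m+1), the loop leaves exactly the closed-form card
theorem cardLoop_range (m : Nat) (n : Int) (h1 : (2 : Int) ^ m ≤ n) (h2 : n < 2 ^ (m + 1)) :
    cardLoop (PySem.List.pyRange 1 (n + 1) 1) = [if n = 2 ^ m then n else 2 * (n - 2 ^ m)] := by
  obtain ⟨P, hP, hP1⟩ : ∃ P : Nat, ((P : Int) = 2 ^ m ∧ 1 ≤ P) := by
    refine ⟨2 ^ m, by push_cast; ring, Nat.one_le_two_pow⟩
  have h2' : n < 2 * (P : Int) := by rw [pow_succ] at h2; omega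
  obtain ⟨j, hjle, hn⟩ : ∃ j : Nat, j ≤ P ∧ n = ((2 * j + (P - j) : Nat) : Int) :=
    ⟨(n - P).toNat, by omega, by push_cast; omega⟩
  have hPn : P = 2 ^ m := by
    have h := hP
    push_cast at h
    exact_mod_cast h
  have hr : PySem.List.pyRange 1 (n + 1) 1 = stepRange 1 1 (2 * j + (P - j)) := by
    have : n + 1 = 1 + ((2 * j + (P - j) : Nat) : Int) := by omega
    rw [this, pyRange_eq_stepRange]
  rw [hr, stepRange_append]
  rw [cardLoop_round j (stepRange 1 1 (2 * j)) (stepRange (1 + 1 * ((2 * j : Nat) : Int)) 1 (P - j))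
      (by rw [length_stepRange])]
  rw [odds_stepRange_one j 1]
  by_cases hcase : j = 0
  · -- n = 2^m : the remaining list is 1..2^m, the survivor is the last card n
    subst hcase
    have hn' : n = (2 : Int) ^ m := by omega
    simp only [stepRange, List.append_nil, if_pos hn']
    have hm1 : P - 0 = (P - 1) + 1 := by omega
    rw [hm1, stepRange_succ_right]
    rw [cardLoop_pow m _ _ (by rw [length_stepRange, ← hPn]; omega)]
    have : (1 : Int) + 1 * ((0 : Nat) : Int) + 1 * ((P - 1 : Nat) : Int) = n := by push_cast; omega
    rw [this]
  · -- n > 2^m : the survivor is the last moved card 2*j = 2*(n - 2^m)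
    obtain ⟨j', rfl⟩ : ∃ j', j = j' + 1 := ⟨j - 1, by omega⟩
    rw [stepRange_succ_right (1 + 1) 2 j']
    rw [← List.append_assoc]
    have hne : n ≠ (2 : Int) ^ m := by omega
    rw [cardLoop_pow m _ _ (by simp [length_stepRange, ← hPn]; omega)]
    rw [if_neg hne]
    have : (1 : Int) + 1 + 2 * ((j' : Nat) : Int) = 2 * (n - 2 ^ m) := by push_cast; omega
    rw [this]

-- altPow computes the largest power of two ≤ n (as L times a power of two)
theorem altPow_spec (n L : Int) (hL : 0 < L) (hLe : L ≤ n) :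
    ∃ t : Nat, altPow n L hL = L * 2 ^ t ∧ altPow n L hL ≤ n ∧ n < 2 * altPow n L hL := by
  by_cases h : L * 2 ≤ n
  · obtain ⟨t, h1, h2, h3⟩ := altPow_spec n (L * 2) (by omega) h
    exact ⟨t + 1, by rw [altPow, dif_pos h, h1]; ring, by rw [altPow, dif_pos h]; omega,
           by rw [altPow, dif_pos h]; omega⟩
  · exact ⟨0, by rw [altPow, dif_neg h]; ring, by rw [altPow, dif_neg h]; omega,
           by rw [altPow, dif_neg h]; omega⟩
termination_by (n - L).toNat
decreasing_by omega

-- ===== VERDICT (by name: the statement is the Claim_ definition above) =====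
theorem card_spec : Claim_equal_card := by
  intro n _
  unfold Spec_card card card_alt
  by_cases hn : n < 1
  · rw [if_pos hn, PySem.List.pyRange_one_eq_nil (by omega), cardLoop_nil]
    rfl
  · rw [if_neg hn]
    obtain ⟨t, h1, h2, h3⟩ := altPow_spec n 1 (by omega) (by omega)
    simp only [one_mul] at h1
    rw [cardLoop_range t n (by omega) (by rw [pow_succ]; omega)]
    rw [h1]
    by_cases hc : n = 2 ^ t <;> simp [hc]
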